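-- pv_equiv track=rewrite | github.com/seanchatmangpt/autotel | autotel/factory/ontology_compiler.py | _determine_semantic_type
-- ===== SOURCE A (Python) =====
-- from typing import Dict, Any, List
--
-- def _determine_semantic_type(class_name: str, class_data: Dict[str, Any]) -> str:
--     """Determine semantic type based on class name and properties."""
--     name_lower = class_name.lower()
--
--     # Check for user input patterns
--     if any(pattern in name_lower for pattern in ['input', 'request', 'query', 'user', 'form']):
--         return 'user_input'
--
--     # Check for recommendation patterns
--     if any(pattern in name_lower for pattern in ['recommendation', 'suggestion', 'proposal', 'option']):
--         return 'recommendation'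
--
--     # Check for decision patterns
--     if any(pattern in name_lower for pattern in ['decision', 'choice', 'selection', 'judgment']):
--         return 'decision'
--
--     # Check for analysis patterns
--     if any(pattern in name_lower for pattern in ['analysis', 'report', 'result', 'outcome']):
--         return 'analysis'
--
--     # Check for reasoning patterns
--     if any(pattern in name_lower for pattern in ['reasoning', 'logic', 'inference', 'conclusion']):
--         return 'reasoning'
--
--     # Default to general
--     return 'general'
-- ===== SOURCE B (Python) =====
-- # Alternative algorithm: instead of searching the name for each pattern, enumerate the
-- # name's substrings (window lengths 4..14) once, look each up in a pattern->category
-- # hash table, and keep the minimum (highest-priority) category found.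
-- _PAT = {
--     'input': 0, 'request': 0, 'query': 0, 'user': 0, 'form': 0,
--     'recommendation': 1, 'suggestion': 1, 'proposal': 1, 'option': 1,
--     'decision': 2, 'choice': 2, 'selection': 2, 'judgment': 2,
--     'analysis': 3, 'report': 3, 'result': 3, 'outcome': 3,
--     'reasoning': 4, 'logic': 4, 'inference': 4, 'conclusion': 4,
-- }
-- _LABELS = ['user_input', 'recommendation', 'decision', 'analysis', 'reasoning', 'general']
--
-- def _determine_semantic_type(class_name, class_data):
--     name = class_name.lower()
--     n = len(name)
--     best = 5
--     for i in range(n):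
--         for j in range(i + 4, min(i + 14, n) + 1):
--             cat = _PAT.get(name[i:j])
--             if cat is not None and cat < best:
--                 best = cat
--     return _LABELS[best]
-- ===== Notes on version B (the rewrite author's own statement) =====
-- stated objective: alternative
-- what changed: Instead of A's five early-return branches that search the name once per pattern, B enumerates the lowered name's substrings of window length 4..14 in a single scan, looks each window up in a pattern->category hash table, and returns the label of the minimum (highest-priority) category found, defaulting to 'general'.
import Mathlib
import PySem

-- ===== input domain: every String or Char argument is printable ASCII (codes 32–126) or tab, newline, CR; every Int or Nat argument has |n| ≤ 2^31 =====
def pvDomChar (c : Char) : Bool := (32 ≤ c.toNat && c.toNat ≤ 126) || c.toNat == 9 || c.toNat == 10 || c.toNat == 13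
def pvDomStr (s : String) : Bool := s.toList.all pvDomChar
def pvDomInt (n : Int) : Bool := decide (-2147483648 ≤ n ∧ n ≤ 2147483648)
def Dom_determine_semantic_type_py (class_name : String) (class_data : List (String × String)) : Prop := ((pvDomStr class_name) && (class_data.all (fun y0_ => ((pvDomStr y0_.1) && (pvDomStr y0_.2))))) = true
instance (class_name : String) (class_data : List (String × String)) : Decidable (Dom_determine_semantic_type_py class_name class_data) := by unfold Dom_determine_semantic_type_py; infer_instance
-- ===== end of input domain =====

-- B classifies by a different algorithm: it enumerates the lowered name's substrings (window
-- lengths 4..14) once, looks each up in a pattern->category table, and returns the label of the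
-- minimum (highest-priority) category found - instead of A's per-pattern substring searches.


-- ===== PORT A =====
def determine_semantic_type_py (class_name : String) (class_data : List (String × String)) : String :=
  let name_lower := PySem.Str.lower class_name
  if ["input", "request", "query", "user", "form"].any (fun p => PySem.Str.isIn p name_lower) then "user_input"
  else if ["recommendation", "suggestion", "proposal", "option"].any (fun p => PySem.Str.isIn p name_lower) then "recommendation"
  else if ["decision", "choice", "selection", "judgment"].any (fun p => PySem.Str.isIn p name_lower) then "decision"
  else if ["analysis", "report", "result", "outcome"].any (fun p => PySem.Str.isIn p name_lower) then "analysis"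
  else if ["reasoning", "logic", "inference", "conclusion"].any (fun p => PySem.Str.isIn p name_lower) then "reasoning"
  else "general"

-- ===== PORT B =====
-- B (from Source B): _PAT, _LABELS, then one pass over all substring windows with a min accumulator.
def dst_pat : PySem.Dict String Int := PySem.Dict.mk
  [("input", 0), ("request", 0), ("query", 0), ("user", 0), ("form", 0),
   ("recommendation", 1), ("suggestion", 1), ("proposal", 1), ("option", 1),
   ("decision", 2), ("choice", 2), ("selection", 2), ("judgment", 2),
   ("analysis", 3), ("report", 3), ("result", 3), ("outcome", 3),
   ("reasoning", 4), ("logic", 4), ("inference", 4), ("conclusion", 4)]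

def dst_labels : List String :=
  ["user_input", "recommendation", "decision", "analysis", "reasoning", "general"]

def determine_semantic_type_py_alt (class_name : String) (class_data : List (String × String)) : String :=
  let name := PySem.Str.lower class_name
  let n : Int := PySem.Str.len name
  let best : Int :=
    (PySem.List.pyRange 0 n 1).foldl (fun best i =>
      (PySem.List.pyRange (i + 4) (min (i + 14) n + 1) 1).foldl (fun best j =>
        match dst_pat.get? (PySem.Str.slice name (some i) (some j)) with
        | some cat => if cat < best then cat else best
        | none => best) best) 5
  PySem.List.pyGetD dst_labels best ""

-- ===== PRECONDITION & SPEC =====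
def Spec_determine_semantic_type_py (class_name : String) (class_data : List (String × String)) (out : String) : Prop := out = determine_semantic_type_py_alt class_name class_data
instance (class_name : String) (class_data : List (String × String)) (out : String) : Decidable (Spec_determine_semantic_type_py class_name class_data out) := by unfold Spec_determine_semantic_type_py; infer_instance

-- ===== CLAIM =====
def Claim_equal_determine_semantic_type_py : Prop := ∀ (class_name : String) (class_data : List (String × String)), Dom_determine_semantic_type_py class_name class_data → Spec_determine_semantic_type_py class_name class_data (determine_semantic_type_py class_name class_data)

-- ===== LEMMAS AND PROOFS =====

-- proof-side view of B's nested loops: the flat list of (i, j) windows, the lookup, the min step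
def dstPairs (n : Int) : List (Int × Int) :=
  (PySem.List.pyRange 0 n 1).flatMap (fun i =>
    (PySem.List.pyRange (i + 4) (min (i + 14) n + 1) 1).map (fun j => (i, j)))

def dstQ (name : String) (p : Int × Int) : Option Int :=
  dst_pat.get? (PySem.Str.slice name (some p.1) (some p.2))

def dstStep (q : Int × Int → Option Int) (b : Int) (p : Int × Int) : Int :=
  match q p with
  | some c => if c < b then c else b
  | none => b

def dstOcc (name : String) (c : Int) : Prop :=
  ∃ p ∈ dstPairs (PySem.Str.len name), dstQ name p = some c

-- the min-fold decreases
lemma foldl_step_le_init (q : Int × Int → Option Int) (L : List (Int × Int)) (init : Int) :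
    L.foldl (dstStep q) init ≤ init := by
  induction L generalizing init with
  | nil => simp
  | cons p L ih =>
      rw [List.foldl_cons]
      refine le_trans (ih (dstStep q init p)) ?_
      simp only [dstStep]
      cases q p with
      | none => simp
      | some c => dsimp only; split <;> omega

-- the min-fold is a lower bound for every category found
lemma foldl_step_le (q : Int × Int → Option Int) (L : List (Int × Int))
    (p : Int × Int) (c : Int) (hc : q p = some c) :
    ∀ init, p ∈ L → L.foldl (dstStep q) init ≤ c := by
  induction L with
  | nil => intro init hp; cases hp
  | cons p' L ih =>
      intro init hp
      rw [List.foldl_cons]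
      rcases List.mem_cons.mp hp with rfl | hp'
      · refine le_trans (foldl_step_le_init q L _) ?_
        simp only [dstStep, hc]
        split <;> omega
      · exact ih _ hp'

-- the min-fold's value is the initial value or a category found
lemma foldl_step_cases (q : Int × Int → Option Int) (L : List (Int × Int)) (init : Int) :
    L.foldl (dstStep q) init = init ∨ ∃ p ∈ L, q p = some (L.foldl (dstStep q) init) := by
  induction L generalizing init with
  | nil => left; rfl
  | cons p L ih =>
      rw [List.foldl_cons]
      rcases ih (dstStep q init p) with h | ⟨p', hp', hq⟩
      · rw [h]
        cases hq2 : q p with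
        | none => left; simp [dstStep, hq2]
        | some c =>
            by_cases hlt : c < init
            · right
              refine ⟨p, List.mem_cons.mpr (Or.inl rfl), ?_⟩
              rw [hq2]
              simp [dstStep, hq2, hlt]
            · left
              simp [dstStep, hq2, hlt]
      · right; exact ⟨p', List.mem_cons_of_mem _ hp', hq⟩

-- a lookup that hits in a literal dict names one of its items
lemma get?_mk_elim (l : List (String × Int)) (w : String) (c : Int)
    (h : (PySem.Dict.mk l).get? w = some c) : (w, c) ∈ l := by
  induction l with
  | nil => simp [PySem.Dict.get?] at h
  | cons p l ih =>
      obtain ⟨k, v⟩ := p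
      rw [PySem.Dict.get?_mk_cons] at h
      by_cases hkw : (k == w) = true
      · rw [if_pos hkw] at h
        injection h with hvc
        have hk : k = w := beq_iff_eq.mp hkw
        subst hk; subst hvc
        exact List.mem_cons.mpr (Or.inl rfl)
      · rw [if_neg hkw] at h
        exact List.mem_cons_of_mem _ (ih h)

-- the pattern table, characterized: a successful lookup is one of the 21 (pattern, category) rules
lemma get?_dst_pat_elim (w : String) (c : Int) (h : dst_pat.get? w = some c) :
    (w = "input" ∧ c = 0) ∨ (w = "request" ∧ c = 0) ∨ (w = "query" ∧ c = 0) ∨ (w = "user" ∧ c = 0) ∨ (w = "form" ∧ c = 0) ∨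
    (w = "recommendation" ∧ c = 1) ∨ (w = "suggestion" ∧ c = 1) ∨ (w = "proposal" ∧ c = 1) ∨ (w = "option" ∧ c = 1) ∨
    (w = "decision" ∧ c = 2) ∨ (w = "choice" ∧ c = 2) ∨ (w = "selection" ∧ c = 2) ∨ (w = "judgment" ∧ c = 2) ∨
    (w = "analysis" ∧ c = 3) ∨ (w = "report" ∧ c = 3) ∨ (w = "result" ∧ c = 3) ∨ (w = "outcome" ∧ c = 3) ∨
    (w = "reasoning" ∧ c = 4) ∨ (w = "logic" ∧ c = 4) ∨ (w = "inference" ∧ c = 4) ∨ (w = "conclusion" ∧ c = 4) := by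
  have hmem := get?_mk_elim
    [("input", 0), ("request", 0), ("query", 0), ("user", 0), ("form", 0),
     ("recommendation", 1), ("suggestion", 1), ("proposal", 1), ("option", 1),
     ("decision", 2), ("choice", 2), ("selection", 2), ("judgment", 2),
     ("analysis", 3), ("report", 3), ("result", 3), ("outcome", 3),
     ("reasoning", 4), ("logic", 4), ("inference", 4), ("conclusion", 4)] w c h
  simpa only [List.mem_cons, List.not_mem_nil, or_false, Prod.mk.injEq] using hmem

-- a slice with nonnegative bounds is an infix
lemma slice_isInfix {α : Type} (t : List α) (i j : Int) (hi : 0 ≤ i) (hj : 0 ≤ j) :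
    PySem.List.slice t (some i) (some j) <:+: t := by
  rw [PySem.List.slice_toNat t hi hj]
  exact (List.take_prefix _ _).isInfix.trans (List.drop_suffix _ _).isInfix

-- every category found by B's window scan comes from a pattern occurring in the name
lemma isIn_of_occ (name : String) (c : Int) (h : dstOcc name c) :
    ∃ w : String, dst_pat.get? w = some c ∧ PySem.Str.isIn w name = true := by
  obtain ⟨⟨i, j⟩, hp, hq⟩ := h
  simp only [dstPairs, List.mem_flatMap, List.mem_map, PySem.List.mem_pyRange_one] at hp
  obtain ⟨i', ⟨hi0, _⟩, j', hj', heq⟩ := hp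
  injection heq with h1 h2
  subst h1; subst h2
  refine ⟨PySem.Str.slice name (some i') (some j'), by simpa [dstQ] using hq, ?_⟩
  rw [PySem.Str.isIn_iff_infix, PySem.Str.toList_slice, PySem.Chars.slice_eq_listSlice]
  exact slice_isInfix name.toList i' j' hi0 (by omega)

-- conversely, a pattern of length 4..14 occurring in the name is found by the window scan
lemma occ_of_isIn (name w : String) (c : Int)
    (h4 : 4 ≤ w.length) (h14 : w.length ≤ 14)
    (hget : dst_pat.get? w = some c) (hin : PySem.Str.isIn w name = true) :
    dstOcc name c := by
  rw [PySem.Str.isIn_iff_infix] at hin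
  obtain ⟨pre, suf, hsplit⟩ := hin
  have hwtl : w.toList.length = w.length := String.length_toList
  have hlen : name.toList.length = pre.length + w.length + suf.length := by
    rw [← hsplit]
    simp [List.length_append, hwtl]
    omega
  have hn : PySem.Str.len name = (name.toList.length : Int) := PySem.Str.len_eq name
  refine ⟨((pre.length : Int), ((pre.length : Int) + (w.length : Int))), ?_, ?_⟩
  · simp only [dstPairs, List.mem_flatMap, List.mem_map, PySem.List.mem_pyRange_one]
    refine ⟨(pre.length : Int), ⟨by omega, ?_⟩, ((pre.length : Int) + (w.length : Int)), ⟨⟨by omega, ?_⟩, rfl⟩⟩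
    · rw [hn]; omega
    · rw [hn]; omega
  · have hslice : PySem.Str.slice name (some (pre.length : Int))
        (some ((pre.length : Int) + (w.length : Int))) = w := by
      rw [← String.toList_inj, PySem.Str.toList_slice, PySem.Chars.slice_eq_listSlice,
          PySem.List.slice_natCast_add, ← hsplit, List.append_assoc, List.drop_left,
          ← hwtl, List.take_left]
    simp only [dstQ]
    rw [hslice]
    exact hget

-- ===== VERDICT =====
theorem determine_semantic_type_py_spec : Claim_equal_determine_semantic_type_py := by
  intro class_name class_data _
  show determine_semantic_type_py class_name class_data
      = determine_semantic_type_py_alt class_name class_data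
  have hBeq : determine_semantic_type_py_alt class_name class_data
      = PySem.List.pyGetD dst_labels
          ((dstPairs (PySem.Str.len (PySem.Str.lower class_name))).foldl
            (dstStep (dstQ (PySem.Str.lower class_name))) 5) "" := by
    unfold determine_semantic_type_py_alt
    dsimp only
    rw [dstPairs, List.foldl_flatMap]
    simp only [List.foldl_map, dstStep, dstQ]
  rw [hBeq]
  unfold determine_semantic_type_py
  dsimp only
  set name := PySem.Str.lower class_name with hname
  set m : Int := (dstPairs (PySem.Str.len name)).foldl (dstStep (dstQ name)) 5 with hm
  have hoccm : m = 5 ∨ dstOcc name m := by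
    rcases foldl_step_cases (dstQ name) (dstPairs (PySem.Str.len name)) 5 with h | ⟨p, hp, hq⟩
    · exact Or.inl h
    · exact Or.inr ⟨p, hp, hq⟩
  have hrange : ∀ c, dstOcc name c → 0 ≤ c ∧ c ≤ 4 := by
    intro c hc
    obtain ⟨w, hw, _⟩ := isIn_of_occ name c hc
    rcases get?_dst_pat_elim w c hw with ⟨_, rfl⟩|⟨_, rfl⟩|⟨_, rfl⟩|⟨_, rfl⟩|⟨_, rfl⟩|⟨_, rfl⟩|⟨_, rfl⟩|⟨_, rfl⟩|⟨_, rfl⟩|⟨_, rfl⟩|⟨_, rfl⟩|⟨_, rfl⟩|⟨_, rfl⟩|⟨_, rfl⟩|⟨_, rfl⟩|⟨_, rfl⟩|⟨_, rfl⟩|⟨_, rfl⟩|⟨_, rfl⟩|⟨_, rfl⟩|⟨_, rfl⟩ <;> omega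
  have hub : ∀ c, dstOcc name c → m ≤ c := by
    intro c hc
    obtain ⟨p, hp, hq⟩ := hc
    exact foldl_step_le (dstQ name) (dstPairs (PySem.Str.len name)) p c hq 5 hp
  have hocc0 : dstOcc name 0 ↔ (["input", "request", "query", "user", "form"].any (fun p => PySem.Str.isIn p name) = true) := by
    constructor
    · intro h
      obtain ⟨w, hw, hin⟩ := isIn_of_occ name 0 h
      simp only [List.any_eq_true]
      rcases get?_dst_pat_elim w 0 hw with ⟨rfl, hc⟩|⟨rfl, hc⟩|⟨rfl, hc⟩|⟨rfl, hc⟩|⟨rfl, hc⟩|⟨rfl, hc⟩|⟨rfl, hc⟩|⟨rfl, hc⟩|⟨rfl, hc⟩|⟨rfl, hc⟩|⟨rfl, hc⟩|⟨rfl, hc⟩|⟨rfl, hc⟩|⟨rfl, hc⟩|⟨rfl, hc⟩|⟨rfl, hc⟩|⟨rfl, hc⟩|⟨rfl, hc⟩|⟨rfl, hc⟩|⟨rfl, hc⟩|⟨rfl, hc⟩ <;>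
        first
          | exact absurd hc (by decide)
          | exact ⟨_, by simp, hin⟩
    · intro h
      simp only [List.any_eq_true, List.mem_cons, List.not_mem_nil, or_false] at h
      obtain ⟨w, hw, hin⟩ := h
      rcases hw with rfl | rfl | rfl | rfl | rfl <;>
        exact occ_of_isIn name _ 0 (by decide) (by decide) (by decide) hin
  have hocc1 : dstOcc name 1 ↔ (["recommendation", "suggestion", "proposal", "option"].any (fun p => PySem.Str.isIn p name) = true) := by
    constructor
    · intro h
      obtain ⟨w, hw, hin⟩ := isIn_of_occ name 1 h
      simp only [List.any_eq_true]
      rcases get?_dst_pat_elim w 1 hw with ⟨rfl, hc⟩|⟨rfl, hc⟩|⟨rfl, hc⟩|⟨rfl, hc⟩|⟨rfl, hc⟩|⟨rfl, hc⟩|⟨rfl, hc⟩|⟨rfl, hc⟩|⟨rfl, hc⟩|⟨rfl, hc⟩|⟨rfl, hc⟩|⟨rfl, hc⟩|⟨rfl, hc⟩|⟨rfl, hc⟩|⟨rfl, hc⟩|⟨rfl, hc⟩|⟨rfl, hc⟩|⟨rfl, hc⟩|⟨rfl, hc⟩|⟨rfl, hc⟩|⟨rfl, hc⟩ <;>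
        first
          | exact absurd hc (by decide)
          | exact ⟨_, by simp, hin⟩
    · intro h
      simp only [List.any_eq_true, List.mem_cons, List.not_mem_nil, or_false] at h
      obtain ⟨w, hw, hin⟩ := h
      rcases hw with rfl | rfl | rfl | rfl <;>
        exact occ_of_isIn name _ 1 (by decide) (by decide) (by decide) hin
  have hocc2 : dstOcc name 2 ↔ (["decision", "choice", "selection", "judgment"].any (fun p => PySem.Str.isIn p name) = true) := by
    constructor
    · intro h
      obtain ⟨w, hw, hin⟩ := isIn_of_occ name 2 h
      simp only [List.any_eq_true]
      rcases get?_dst_pat_elim w 2 hw with ⟨rfl, hc⟩|⟨rfl, hc⟩|⟨rfl, hc⟩|⟨rfl, hc⟩|⟨rfl, hc⟩|⟨rfl, hc⟩|⟨rfl, hc⟩|⟨rfl, hc⟩|⟨rfl, hc⟩|⟨rfl, hc⟩|⟨rfl, hc⟩|⟨rfl, hc⟩|⟨rfl, hc⟩|⟨rfl, hc⟩|⟨rfl, hc⟩|⟨rfl, hc⟩|⟨rfl, hc⟩|⟨rfl, hc⟩|⟨rfl, hc⟩|⟨rfl, hc⟩|⟨rfl, hc⟩ <;>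
        first
          | exact absurd hc (by decide)
          | exact ⟨_, by simp, hin⟩
    · intro h
      simp only [List.any_eq_true, List.mem_cons, List.not_mem_nil, or_false] at h
      obtain ⟨w, hw, hin⟩ := h
      rcases hw with rfl | rfl | rfl | rfl <;>
        exact occ_of_isIn name _ 2 (by decide) (by decide) (by decide) hin
  have hocc3 : dstOcc name 3 ↔ (["analysis", "report", "result", "outcome"].any (fun p => PySem.Str.isIn p name) = true) := by
    constructor
    · intro h
      obtain ⟨w, hw, hin⟩ := isIn_of_occ name 3 h
      simp only [List.any_eq_true]
      rcases get?_dst_pat_elim w 3 hw with ⟨rfl, hc⟩|⟨rfl, hc⟩|⟨rfl, hc⟩|⟨rfl, hc⟩|⟨rfl, hc⟩|⟨rfl, hc⟩|⟨rfl, hc⟩|⟨rfl, hc⟩|⟨rfl, hc⟩|⟨rfl, hc⟩|⟨rfl, hc⟩|⟨rfl, hc⟩|⟨rfl, hc⟩|⟨rfl, hc⟩|⟨rfl, hc⟩|⟨rfl, hc⟩|⟨rfl, hc⟩|⟨rfl, hc⟩|⟨rfl, hc⟩|⟨rfl, hc⟩|⟨rfl, hc⟩ <;>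
        first
          | exact absurd hc (by decide)
          | exact ⟨_, by simp, hin⟩
    · intro h
      simp only [List.any_eq_true, List.mem_cons, List.not_mem_nil, or_false] at h
      obtain ⟨w, hw, hin⟩ := h
      rcases hw with rfl | rfl | rfl | rfl <;>
        exact occ_of_isIn name _ 3 (by decide) (by decide) (by decide) hin
  have hocc4 : dstOcc name 4 ↔ (["reasoning", "logic", "inference", "conclusion"].any (fun p => PySem.Str.isIn p name) = true) := by
    constructor
    · intro h
      obtain ⟨w, hw, hin⟩ := isIn_of_occ name 4 h
      simp only [List.any_eq_true]
      rcases get?_dst_pat_elim w 4 hw with ⟨rfl, hc⟩|⟨rfl, hc⟩|⟨rfl, hc⟩|⟨rfl, hc⟩|⟨rfl, hc⟩|⟨rfl, hc⟩|⟨rfl, hc⟩|⟨rfl, hc⟩|⟨rfl, hc⟩|⟨rfl, hc⟩|⟨rfl, hc⟩|⟨rfl, hc⟩|⟨rfl, hc⟩|⟨rfl, hc⟩|⟨rfl, hc⟩|⟨rfl, hc⟩|⟨rfl, hc⟩|⟨rfl, hc⟩|⟨rfl, hc⟩|⟨rfl, hc⟩|⟨rfl, hc⟩ <;>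
        first
          | exact absurd hc (by decide)
          | exact ⟨_, by simp, hin⟩
    · intro h
      simp only [List.any_eq_true, List.mem_cons, List.not_mem_nil, or_false] at h
      obtain ⟨w, hw, hin⟩ := h
      rcases hw with rfl | rfl | rfl | rfl <;>
        exact occ_of_isIn name _ 4 (by decide) (by decide) (by decide) hin
  by_cases b0 : (["input", "request", "query", "user", "form"].any (fun p => PySem.Str.isIn p name) = true)
  · have h0 : m = 0 := by
      have h0le := hub 0 (hocc0.mpr b0)
      rcases hoccm with h | h
      · omega
      · have := (hrange m h).1; omega
    rw [if_pos b0, h0]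
    decide
  · by_cases b1 : (["recommendation", "suggestion", "proposal", "option"].any (fun p => PySem.Str.isIn p name) = true)
    · have h1 : m = 1 := by
        have h1le := hub 1 (hocc1.mpr b1)
        rcases hoccm with h | h
        · omega
        · have hr := hrange m h
          have hne : m ≠ 0 := fun h0 => b0 (hocc0.mp (h0 ▸ h))
          omega
      rw [if_neg b0, if_pos b1, h1]
      decide
    · by_cases b2 : (["decision", "choice", "selection", "judgment"].any (fun p => PySem.Str.isIn p name) = true)
      · have h2 : m = 2 := by
          have h2le := hub 2 (hocc2.mpr b2)
          rcases hoccm with h | h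
          · omega
          · have hr := hrange m h
            have n0 : m ≠ 0 := fun h0 => b0 (hocc0.mp (h0 ▸ h))
            have n1 : m ≠ 1 := fun h1 => b1 (hocc1.mp (h1 ▸ h))
            omega
        rw [if_neg b0, if_neg b1, if_pos b2, h2]
        decide
      · by_cases b3 : (["analysis", "report", "result", "outcome"].any (fun p => PySem.Str.isIn p name) = true)
        · have h3 : m = 3 := by
            have h3le := hub 3 (hocc3.mpr b3)
            rcases hoccm with h | h
            · omega
            · have hr := hrange m h
              have n0 : m ≠ 0 := fun h0 => b0 (hocc0.mp (h0 ▸ h))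
              have n1 : m ≠ 1 := fun h1 => b1 (hocc1.mp (h1 ▸ h))
              have n2 : m ≠ 2 := fun h2 => b2 (hocc2.mp (h2 ▸ h))
              omega
          rw [if_neg b0, if_neg b1, if_neg b2, if_pos b3, h3]
          decide
        · by_cases b4 : (["reasoning", "logic", "inference", "conclusion"].any (fun p => PySem.Str.isIn p name) = true)
          · have h4 : m = 4 := by
              have h4le := hub 4 (hocc4.mpr b4)
              rcases hoccm with h | h
              · omega
              · have hr := hrange m h
                have n0 : m ≠ 0 := fun h0 => b0 (hocc0.mp (h0 ▸ h))
                have n1 : m ≠ 1 := fun h1 => b1 (hocc1.mp (h1 ▸ h))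
                have n2 : m ≠ 2 := fun h2 => b2 (hocc2.mp (h2 ▸ h))
                have n3 : m ≠ 3 := fun h3 => b3 (hocc3.mp (h3 ▸ h))
                omega
            rw [if_neg b0, if_neg b1, if_neg b2, if_neg b3, if_pos b4, h4]
            decide
          · have h5 : m = 5 := by
              rcases hoccm with h | h
              · exact h
              · exfalso
                have hr := hrange m h
                have hcase : m = 0 ∨ m = 1 ∨ m = 2 ∨ m = 3 ∨ m = 4 := by omega
                rcases hcase with hc | hc | hc | hc | hc <;> rw [hc] at h
                · exact b0 (hocc0.mp h)
                · exact b1 (hocc1.mp h)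
                · exact b2 (hocc2.mp h)
                · exact b3 (hocc3.mp h)
                · exact b4 (hocc4.mp h)
            rw [if_neg b0, if_neg b1, if_neg b2, if_neg b3, if_neg b4, h5]
            decide
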